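-- pv_equiv track=rewrite | github.com/pypi-data/pypi-mirror-399 | packages/code-typer/code_typer-0.1.1-cp310-cp310-manylinux1_x86_64.manylinux2014_x86_64.manylinux_2_17_x86_64.manylinux_2_5_x86_64.whl/code_typer/code_analyzer.py | _build_reverse_graph
-- ===== SOURCE A (Python) =====
-- def _build_reverse_graph(
--     call_graph: dict[str, set[str]]
-- ) -> dict[str, set[str]]:
--     """Build reverse call graph (who calls this function)."""
--     reverse: dict[str, set[str]] = {name: set() for name in call_graph}
--
--     for caller, callees in call_graph.items():
--         for callee in callees:
--             if callee in reverse: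
--                 reverse[callee].add(caller)
--
--     return reverse
-- ===== SOURCE B (Python) =====
-- def _build_reverse_graph(
--     call_graph: dict[str, set[str]]
-- ) -> dict[str, set[str]]:
--     """Build reverse call graph (who calls this function)."""
--     return {
--         name: {caller for caller, callees in call_graph.items() if name in callees}
--         for name in call_graph
--     }
-- ===== Notes on version B (the rewrite author's own statement) =====
-- stated objective: alternative
-- what changed: A makes one pass over the edges, pre-initialising an empty bucket per node and pushing each caller into its callee's bucket; B instead derives each node's caller set independently by scanning all (caller, callees) pairs once per node in a dict comprehension, with no mutable bucket table.
import Mathlib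
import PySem

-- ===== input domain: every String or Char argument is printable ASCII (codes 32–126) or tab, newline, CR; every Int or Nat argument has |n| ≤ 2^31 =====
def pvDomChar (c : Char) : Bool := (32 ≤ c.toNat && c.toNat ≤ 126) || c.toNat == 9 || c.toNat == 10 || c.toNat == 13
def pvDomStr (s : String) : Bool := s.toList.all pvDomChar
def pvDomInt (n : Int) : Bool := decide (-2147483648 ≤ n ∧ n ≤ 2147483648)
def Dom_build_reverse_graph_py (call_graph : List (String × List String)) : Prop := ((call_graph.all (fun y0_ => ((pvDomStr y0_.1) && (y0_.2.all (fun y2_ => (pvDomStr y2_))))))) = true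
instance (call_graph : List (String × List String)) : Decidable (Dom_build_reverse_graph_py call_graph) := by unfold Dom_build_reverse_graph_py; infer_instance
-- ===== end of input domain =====

-- B builds the reverse graph per target node (scan all edges once per node) instead of A's single
-- edge pass into pre-initialised buckets; same return value, stated objective 'alternative'.

-- ===== PORT A =====
-- Port of A: initialise every node with an empty set, then one pass over the edges adding each
-- caller to its callee's bucket (if that callee is a node).
def build_reverse_graph_py (call_graph : List (String × List String)) : List (String × List String) :=
  let g : PySem.Dict String (List String) := PySem.Dict.ofList call_graph
  let rev0 : PySem.Dict String (PySem.Set String) :=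
    g.items.foldl (fun d p => d.insert p.1 PySem.Set.empty) PySem.Dict.empty
  let rev : PySem.Dict String (PySem.Set String) :=
    g.items.foldl (fun d p =>
      p.2.foldl (fun d callee =>
        if d.contains callee then d.modify callee PySem.Set.empty (fun s => PySem.Set.add s p.1)
        else d) d) rev0
  rev.items

-- ===== PORT B =====
-- Port of B: for each node, scan the whole graph and collect the callers whose callee set mentions it.
def build_reverse_graph_py_alt (call_graph : List (String × List String)) : List (String × List String) :=
  let g : PySem.Dict String (List String) := PySem.Dict.ofList call_graph
  g.keys.map (fun name =>
    (name, PySem.Set.ofList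
      (g.items.filterMap (fun p => if p.2.contains name then some p.1 else none))))

-- ===== PRECONDITION & SPEC =====
def Spec_build_reverse_graph_py (call_graph : List (String × List String)) (out : List (String × List String)) : Prop := out = build_reverse_graph_py_alt call_graph
instance (call_graph : List (String × List String)) (out : List (String × List String)) : Decidable (Spec_build_reverse_graph_py call_graph out) := by unfold Spec_build_reverse_graph_py; infer_instance

-- ===== CLAIM (what is proved, stated in full; the proofs are below) =====
def Claim_equal_build_reverse_graph_py : Prop := ∀ (call_graph : List (String × List String)), Dom_build_reverse_graph_py call_graph → Spec_build_reverse_graph_py call_graph (build_reverse_graph_py call_graph)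

-- ===== LEMMAS AND PROOFS =====

-- A's inner loop (one caller's callee set) only modifies existing buckets: the key list is unchanged.
lemma inner_keys (caller : String) (callees : List String)
    (d : PySem.Dict String (PySem.Set String)) :
    (callees.foldl (fun d callee =>
        if d.contains callee then d.modify callee PySem.Set.empty (fun s => PySem.Set.add s caller)
        else d) d).keys = d.keys := by
  induction callees generalizing d with
  | nil => rfl
  | cons c rest ih =>
    simp only [List.foldl_cons]
    rw [ih]
    by_cases hc : d.contains c
    · rw [if_pos hc, PySem.Dict.keys_modify, PySem.Dict.keys_insert_of_contains _ _ hc]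
    · rw [if_neg hc]

-- A's inner loop adds the caller to bucket k exactly when k is a present key occurring in callees.
lemma inner_getD (caller : String) (callees : List String)
    (d : PySem.Dict String (PySem.Set String)) (k : String) :
    (callees.foldl (fun d callee =>
        if d.contains callee then d.modify callee PySem.Set.empty (fun s => PySem.Set.add s caller)
        else d) d).getD k PySem.Set.empty =
      (if d.contains k = true ∧ k ∈ callees then PySem.Set.add (d.getD k PySem.Set.empty) caller
       else d.getD k PySem.Set.empty) := by
  induction callees generalizing d with
  | nil => simp
  | cons c rest ih =>
    simp only [List.foldl_cons]
    rw [ih]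
    have hck : ∀ (f : PySem.Set String → PySem.Set String),
        (if d.contains c then d.modify c PySem.Set.empty f else d).contains k = d.contains k := by
      intro f
      by_cases hc : d.contains c
      · rw [if_pos hc, PySem.Dict.contains_modify]
        by_cases hkc : k = c
        · subst hkc; simp [hc]
        · simp [hkc]
      · rw [if_neg hc]
    rw [hck]
    by_cases hc : d.contains c
    · rw [if_pos hc, PySem.Dict.getD_modify]
      by_cases hkc : k = c
      · subst hkc
        by_cases hkr : k ∈ rest
        · simp [hc, hkr]
        · simp [hc, hkr]
      · simp only [if_neg hkc, List.mem_cons]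
        by_cases hk : d.contains k = true <;> by_cases hkr : k ∈ rest <;> simp_all
    · rw [if_neg hc]
      simp only [List.mem_cons]
      by_cases hk : d.contains k = true
      · have hkc : k ≠ c := fun h => hc (h ▸ hk)
        simp [hk, hkc]
      · simp [hk]

-- A's edge pass never changes the key list of the reverse dict.
lemma outer_keys (l : List (String × List String)) (d : PySem.Dict String (PySem.Set String)) :
    (l.foldl (fun d p =>
        p.2.foldl (fun d callee =>
          if d.contains callee then d.modify callee PySem.Set.empty (fun s => PySem.Set.add s p.1)
          else d) d) d).keys = d.keys := by
  induction l generalizing d with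
  | nil => rfl
  | cons p rest ih => simp only [List.foldl_cons]; rw [ih, inner_keys]

-- A present bucket after A's edge pass is the conditional add-fold of the callers over the edges.
lemma outer_getD (l : List (String × List String))
    (d : PySem.Dict String (PySem.Set String)) (k : String) (hk : d.contains k = true) :
    (l.foldl (fun d p =>
        p.2.foldl (fun d callee =>
          if d.contains callee then d.modify callee PySem.Set.empty (fun s => PySem.Set.add s p.1)
          else d) d) d).getD k PySem.Set.empty =
      l.foldl (fun s p => if k ∈ p.2 then PySem.Set.add s p.1 else s) (d.getD k PySem.Set.empty) := by
  induction l generalizing d with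
  | nil => rfl
  | cons p rest ih =>
    simp only [List.foldl_cons]
    have hk' : (p.2.foldl (fun d callee =>
        if d.contains callee then d.modify callee PySem.Set.empty (fun s => PySem.Set.add s p.1)
        else d) d).contains k = true := by
      rw [PySem.Dict.contains_eq_decide_mem_keys, inner_keys,
        ← PySem.Dict.contains_eq_decide_mem_keys]; exact hk
    rw [ih _ hk', inner_getD]
    by_cases hm : k ∈ p.2
    · simp [hk, hm]
    · simp [hm]

-- That conditional add-fold from ∅ is exactly B's set of the filtered callers.
lemma fold_eq_ofList (l : List (String × List String)) (k : String) :
    l.foldl (fun s p => if k ∈ p.2 then PySem.Set.add s p.1 else s) (PySem.Set.empty : PySem.Set String) =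
      PySem.Set.ofList (l.filterMap (fun p => if p.2.contains k then some p.1 else none)) := by
  rw [PySem.Set.ofList_eq_foldl, List.foldl_filterMap]
  congr 1
  funext s p
  by_cases h : k ∈ p.2 <;> simp [h]

theorem build_reverse_graph_py_eq (call_graph : List (String × List String)) :
    build_reverse_graph_py call_graph = build_reverse_graph_py_alt call_graph := by
  unfold build_reverse_graph_py build_reverse_graph_py_alt
  set g : PySem.Dict String (List String) := PySem.Dict.ofList call_graph with hg
  have hnd : g.keys.Nodup := PySem.Dict.nodup_keys_ofList call_graph
  have hkeys_def : g.keys = g.items.map (·.1) := rfl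
  have h0 : (g.items.foldl (fun d p => d.insert p.1 PySem.Set.empty)
        (PySem.Dict.empty : PySem.Dict String (PySem.Set String))).items
      = g.items.map (fun p => (p.1, (PySem.Set.empty : PySem.Set String))) := by
    have := PySem.Dict.items_foldl_insert_fresh g.items (fun p => p.1)
      (fun _ => (PySem.Set.empty : PySem.Set String))
      (PySem.Dict.empty : PySem.Dict String (PySem.Set String))
      (fun a _ => PySem.Dict.contains_empty a.1)
      (by rw [← hkeys_def]; exact hnd)
    simpa using this
  set rev0 : PySem.Dict String (PySem.Set String) :=
    g.items.foldl (fun d p => d.insert p.1 PySem.Set.empty) PySem.Dict.empty with hrev0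
  have h0keys : rev0.keys = g.keys := by
    show rev0.items.map (·.1) = g.keys
    rw [h0, hkeys_def, List.map_map]; rfl
  have h0nd : rev0.keys.Nodup := h0keys ▸ hnd
  set F := (fun (d : PySem.Dict String (PySem.Set String)) (p : String × List String) =>
      p.2.foldl (fun d callee =>
        if d.contains callee then d.modify callee PySem.Set.empty (fun s => PySem.Set.add s p.1)
        else d) d) with hF
  have hkeys : (g.items.foldl F rev0).keys = g.keys := by rw [outer_keys, h0keys]
  have hndr : (g.items.foldl F rev0).keys.Nodup := hkeys ▸ hnd
  rw [PySem.Dict.items_eq_map_keys _ hndr PySem.Set.empty, hkeys]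
  apply List.map_congr_left
  intro n hn
  have hc0 : rev0.contains n = true := by
    rw [PySem.Dict.contains_eq_decide_mem_keys, h0keys]; exact decide_eq_true hn
  have hg0 : rev0.getD n PySem.Set.empty = PySem.Set.empty := by
    obtain ⟨p, hp, hpn⟩ : ∃ p ∈ g.items, p.1 = n := by
      rw [hkeys_def] at hn; simpa using hn
    have hmem : (n, (PySem.Set.empty : PySem.Set String)) ∈ rev0.items := by
      rw [h0]; exact List.mem_map.mpr ⟨p, hp, by rw [hpn]⟩
    exact PySem.Dict.getD_of_mem_items _ hmem h0nd _
  rw [outer_getD _ _ _ hc0, hg0, fold_eq_ofList]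

-- ===== VERDICT (by name: the statement is the Claim_ definition above) =====
theorem build_reverse_graph_py_spec : Claim_equal_build_reverse_graph_py := by
  intro call_graph _
  unfold Spec_build_reverse_graph_py
  exact build_reverse_graph_py_eq call_graph
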